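-- pv_equiv track=rewrite | github.com/silverwestK/Coding-Test-Study | HackerRank Solutions/Greedy/goodlandelectricity_medium_LHA.py | pylons
-- ===== SOURCE A (Python) =====
-- def pylons(k, arr):
--     leng = len(arr)
--     start = 0
--     last_pylon = -1
--
--     total_pylons = 0
--     while (start < leng):
--         furthest = min(start + k - 1, leng - 1)
--
--         for i in range(furthest, last_pylon, -1):
--             if arr[i]:
--                 total_pylons += 1
--                 start = i + k
--                 last_pylon = i
--                 break
--         else:
--             return -1
--
--     return total_pylons
-- ===== SOURCE B (Python) =====
-- def pylons(k, arr):
--     n = len(arr)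
--     plants = [i for i, v in enumerate(arr) if v]
--     count = 0
--     covered = 0          # first index not yet covered
--     last = -1            # position of the last pylon placed
--     idx = 0              # pointer into plants (two-pointer: advances once overall)
--     while covered < n:
--         limit = min(covered + k - 1, n - 1)
--         best = -1
--         while idx < len(plants) and plants[idx] <= limit:
--             best = plants[idx]
--             idx += 1
--         if best == -1 or best <= last:
--             return -1
--         count += 1
--         last = best
--         covered = best + k
--     return count
-- ===== Notes on version B (the rewrite author's own statement) =====
-- stated objective: alternative
-- what changed: Replaced the per-step backward scan over arr with a precomputed ascending list of plant positions consumed once by a two-pointer greedy (one pass total over the plants instead of repeated window scans); this removes A's O(n*k) worst case but is not measurably faster on typical inputs.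
import Mathlib
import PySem

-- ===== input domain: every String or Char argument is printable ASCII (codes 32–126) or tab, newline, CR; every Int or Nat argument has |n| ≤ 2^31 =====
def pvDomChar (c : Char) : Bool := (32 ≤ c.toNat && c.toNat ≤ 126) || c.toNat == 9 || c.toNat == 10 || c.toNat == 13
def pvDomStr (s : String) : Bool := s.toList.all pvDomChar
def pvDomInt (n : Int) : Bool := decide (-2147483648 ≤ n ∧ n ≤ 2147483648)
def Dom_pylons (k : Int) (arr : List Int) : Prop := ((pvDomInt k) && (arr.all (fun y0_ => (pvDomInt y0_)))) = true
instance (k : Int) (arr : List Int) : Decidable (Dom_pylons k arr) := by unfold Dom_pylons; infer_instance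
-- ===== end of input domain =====

-- B replaces A's per-step backward scan over arr by a precomputed ascending list of
-- plant positions consumed once by a two-pointer greedy (alternative algorithm, same results).

-- ===== PORT A =====
-- 'for i in range(furthest, last_pylon, -1): if arr[i]: ... break' with its else:
-- the range list is materialised (pyRange) and scanned; none = the else branch (no break).
-- The index i is always in range when the test runs (0 <= last_pylon+1 <= i <= leng-1),
-- so the total pyGetD is exact here.
def scanLoop (arr : List Int) : List Int → Option Int
  | [] => none
  | i :: rest => if PySem.List.pyGetD arr i 0 ≠ 0 then some i else scanLoop arr rest

-- the while loop of A, state (start, last_pylon, total_pylons); fuel only makes the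
-- recursion structural: last_pylon strictly increases inside [0, leng-1] on every
-- iteration that continues, so the loop runs at most leng+1 times and the fuel
-- arr.length + 1 passed by 'pylons' is never exhausted.
def pylonsLoop (k : Int) (arr : List Int) (leng : Int) : Nat → Int → Int → Int → Int
  | 0, _, _, _ => -1
  | fuel + 1, start, lastPylon, total =>
    if start < leng then
      match scanLoop arr (PySem.List.pyRange (min (start + k - 1) (leng - 1)) lastPylon (-1)) with
      | some i => pylonsLoop k arr leng fuel (i + k) i (total + 1)
      | none => -1
    else total

def pylons (k : Int) (arr : List Int) : Int :=
  pylonsLoop k arr (PySem.List.len arr) (arr.length + 1) 0 (-1) 0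

-- ===== PORT B =====
-- plants = [i for i, v in enumerate(arr) if v]
def plantList (arr : List Int) : List Int :=
  ((PySem.List.enumerate arr 0).filter (fun p => decide (p.2 ≠ 0))).map (fun p => p.1)

-- the inner while: advance the pointer past every plant ≤ limit, remembering the last one
-- (the suffix of plants not yet passed plays the role of Source B's index idx)
def consume (limit best : Int) (plants : List Int) : Int × List Int :=
  match plants with
  | [] => (best, [])
  | p :: rest => if p ≤ limit then consume limit p rest else (best, p :: rest)

-- the outer while of B, state (remaining plants, covered, last, count); fuel only makes
-- the recursion structural: every iteration that continues consumes at least one plant,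
-- so the loop runs at most arr.length + 1 times and the fuel is never exhausted.
def altLoop (k n : Int) : Nat → List Int → Int → Int → Int → Int
  | 0, _, _, _, _ => -1
  | fuel + 1, plants, covered, last, count =>
    if covered < n then
      let r := consume (min (covered + k - 1) (n - 1)) (-1) plants
      if r.1 = -1 ∨ r.1 ≤ last then -1
      else altLoop k n fuel r.2 (r.1 + k) r.1 (count + 1)
    else count

def pylons_alt (k : Int) (arr : List Int) : Int :=
  altLoop k (PySem.List.len arr) (arr.length + 1) (plantList arr) 0 (-1) 0

-- ===== PRECONDITION & SPEC =====
def Spec_pylons (k : Int) (arr : List Int) (out : Int) : Prop := out = pylons_alt k arr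
instance (k : Int) (arr : List Int) (out : Int) : Decidable (Spec_pylons k arr out) := by unfold Spec_pylons; infer_instance

-- ===== CLAIM (what is proved, stated in full; the proofs are below) =====
def Claim_equal_pylons : Prop := ∀ (k : Int) (arr : List Int), Dom_pylons k arr → Spec_pylons k arr (pylons k arr)

-- ===== LEMMAS AND PROOFS =====

-- membership in plantList
theorem mem_plantList (arr : List Int) (x : Int) :
    x ∈ plantList arr ↔ ∃ (m : Nat), ∃ _ : m < arr.length, x = (m : Int) ∧ arr[m] ≠ 0 := by
  unfold plantList
  simp [List.mem_filter, PySem.List.mem_enumerate_iff]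

theorem plantList_pairwise (arr : List Int) : (plantList arr).Pairwise (· < ·) := by
  unfold plantList
  rw [List.pairwise_map]
  exact (PySem.List.pairwise_lt_enumerate arr 0).filter _

-- getLast? of a strictly increasing list is its maximum, and conversely
theorem getLast?_eq_of_max (l : List Int) (x : Int) (hs : l.Pairwise (· < ·))
    (hx : x ∈ l) (hmax : ∀ y ∈ l, y ≤ x) : l.getLast? = some x := by
  induction l with
  | nil => simp at hx
  | cons a t ih =>
    cases t with
    | nil => simp at hx ⊢; simp [hx]
    | cons b t2 =>
      rw [List.getLast?_cons_cons]
      have hab : a < b := (List.pairwise_cons.mp hs).1 b (by simp)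
      have hxt : x ∈ b :: t2 := by
        rcases List.mem_cons.mp hx with rfl | h
        · exact absurd (hmax b (by simp)) (by omega)
        · exact h
      exact ih hs.of_cons hxt (fun y hy => hmax y (List.mem_cons_of_mem a hy))

theorem max_of_getLast? (l : List Int) (x : Int) (hs : l.Pairwise (· < ·))
    (h : l.getLast? = some x) : ∀ y ∈ l, y ≤ x := by
  induction l with
  | nil => simp at h
  | cons a t ih =>
    cases t with
    | nil =>
      simp at h
      intro y hy; simp at hy; omega
    | cons b t2 =>
      rw [List.getLast?_cons_cons] at h
      have ht := ih hs.of_cons h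
      intro y hy
      rcases List.mem_cons.mp hy with rfl | h2
      · have hab : y < b := (List.pairwise_cons.mp hs).1 b (by simp)
        have := ht b (by simp)
        omega
      · exact ht y h2

-- on a strictly increasing list, takeWhile/dropWhile (· ≤ f) are filters
theorem takeWhile_eq_filter_of_sorted (l : List Int) (f : Int) (hs : l.Pairwise (· < ·)) :
    l.takeWhile (fun p => decide (p ≤ f)) = l.filter (fun p => decide (p ≤ f)) := by
  induction l with
  | nil => simp
  | cons a t ih =>
    by_cases ha : a ≤ f
    · simp [ha, ih hs.of_cons]
    · have : t.filter (fun p => decide (p ≤ f)) = [] := by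
        rw [List.filter_eq_nil_iff]
        intro y hy
        have := (List.pairwise_cons.mp hs).1 y hy
        simp; omega
      simp [ha, this]

theorem dropWhile_eq_filter_of_sorted (l : List Int) (f : Int) (hs : l.Pairwise (· < ·)) :
    l.dropWhile (fun p => decide (p ≤ f)) = l.filter (fun p => decide (f < p)) := by
  induction l with
  | nil => simp
  | cons a t ih =>
    by_cases ha : a ≤ f
    · simp [ha, show ¬ f < a by omega, ih hs.of_cons]
    · have : t.filter (fun p => decide (f < p)) = t := by
        rw [List.filter_eq_self]
        intro y hy
        have := (List.pairwise_cons.mp hs).1 y hy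
        simp; omega
      simp [List.filter_cons, ha, this]

-- closed form of consume
theorem consume_eq (limit b : Int) (S : List Int) :
    consume limit b S =
      ((S.takeWhile (fun p => decide (p ≤ limit))).getLast?.getD b,
       S.dropWhile (fun p => decide (p ≤ limit))) := by
  induction S generalizing b with
  | nil => simp [consume]
  | cons p rest ih =>
    by_cases hp : p ≤ limit
    · rw [show consume limit b (p :: rest) = consume limit p rest from by simp [consume, hp]]
      rw [ih p]
      simp only [List.takeWhile_cons, List.dropWhile_cons, hp, decide_true, if_true]
      congr 1
      rw [List.getLast?_cons]
      simp
    · simp [consume, hp]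

-- A's backward scan finds the greatest plant position in (last, f]
theorem scan_eq_getLast (arr : List Int) (f last : Int) (hl : -1 ≤ last) :
    scanLoop arr (PySem.List.pyRange f last (-1)) =
      ((plantList arr).filter (fun p => decide (last < p) && decide (p ≤ f))).getLast? := by
  by_cases hfl : f ≤ last
  · rw [PySem.List.pyRange_neg_one_eq_nil hfl]
    rw [show (plantList arr).filter (fun p => decide (last < p) && decide (p ≤ f)) = [] from by
      rw [List.filter_eq_nil_iff]; intro y _; simp; omega]
    simp [scanLoop]
  · have hf0 : 0 ≤ f := by omega
    rw [PySem.List.pyRange_neg_one_cons (by omega)]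
    by_cases hv : PySem.List.pyGetD arr f 0 ≠ 0
    · -- found a plant at f
      have hflen : f < (arr.length : Int) := by
        by_contra hge
        have : PySem.List.pyGet? arr f = none := by
          rw [PySem.List.pyGet?_eq_none_iff]
          unfold PySem.Raise.InRange
          omega
        apply hv
        unfold PySem.List.pyGetD
        rw [this]
        rfl
      have hmem : f ∈ plantList arr := by
        rw [mem_plantList]
        refine ⟨f.toNat, ?_, ?_, ?_⟩
        · omega
        · omega
        · rwa [PySem.List.pyGetD_eq_getElem arr 0 hf0 (by simpa using hflen)] at hv
      rw [show scanLoop arr (f :: PySem.List.pyRange (f - 1) last (-1)) = some f from by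
        simp [scanLoop, hv]]
      refine (getLast?_eq_of_max _ f ((plantList_pairwise arr).filter _) ?_ ?_).symm
      · simp [List.mem_filter, hmem]; omega
      · intro y hy
        simp [List.mem_filter] at hy
        omega
    · -- no plant at f: step down
      simp only [ne_eq, not_not] at hv
      have hstep : scanLoop arr (f :: PySem.List.pyRange (f - 1) last (-1)) =
          scanLoop arr (PySem.List.pyRange (f - 1) last (-1)) := by
        simp [scanLoop, hv]
      have hnot : f ∉ plantList arr := by
        rw [mem_plantList]
        rintro ⟨m, hm, rfl, hval⟩
        apply hval
        have := PySem.List.pyGetD_eq_getElem arr (i := (m : Int)) 0 (by omega) (by simpa using hm)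
        rw [this] at hv
        simpa using hv
      have hfilt : (plantList arr).filter (fun p => decide (last < p) && decide (p ≤ f)) =
          (plantList arr).filter (fun p => decide (last < p) && decide (p ≤ f - 1)) := by
        apply List.filter_congr
        intro p hp
        have hpf : p ≠ f := fun he => hnot (he ▸ hp)
        by_cases h1 : last < p
        · simp [h1, decide_eq_decide]; omega
        · simp [h1]
      rw [hstep, hfilt, scan_eq_getLast arr (f - 1) last hl]
termination_by (f - last).toNat
decreasing_by omega

-- the plants still to the right of the last pylon
def plantsGT (arr : List Int) (last : Int) : List Int :=
  (plantList arr).filter (fun p => decide (last < p))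

theorem plantsGT_pairwise (arr : List Int) (last : Int) :
    (plantsGT arr last).Pairwise (· < ·) := (plantList_pairwise arr).filter _

theorem filter_plantsGT (arr : List Int) (last f : Int) :
    (plantsGT arr last).filter (fun p => decide (p ≤ f)) =
      (plantList arr).filter (fun p => decide (last < p) && decide (p ≤ f)) := by
  unfold plantsGT
  rw [List.filter_filter]
  exact List.filter_congr (fun p _ => Bool.and_comm ..)

theorem consume_none (arr : List Int) (f last : Int) (hl : -1 ≤ last)
    (h : scanLoop arr (PySem.List.pyRange f last (-1)) = none) :
    (consume f (-1) (plantsGT arr last)).1 = -1 := by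
  rw [consume_eq, takeWhile_eq_filter_of_sorted _ _ (plantsGT_pairwise arr last), filter_plantsGT]
  rw [scan_eq_getLast arr f last hl] at h
  simp [h]

theorem consume_some (arr : List Int) (f last i : Int) (hl : -1 ≤ last)
    (h : scanLoop arr (PySem.List.pyRange f last (-1)) = some i) :
    consume f (-1) (plantsGT arr last) = (i, plantsGT arr i) ∧
      last < i ∧ 0 ≤ i ∧ i ≤ f ∧ i < (arr.length : Int) := by
  rw [scan_eq_getLast arr f last hl] at h
  have hsort : ((plantList arr).filter
      (fun p => decide (last < p) && decide (p ≤ f))).Pairwise (· < ·) :=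
    (plantList_pairwise arr).filter _
  have hmem : i ∈ (plantList arr).filter (fun p => decide (last < p) && decide (p ≤ f)) :=
    List.mem_of_getLast? h
  have hbounds : last < i ∧ i ≤ f ∧ i ∈ plantList arr := by
    simp [List.mem_filter] at hmem
    tauto
  have hmax := max_of_getLast? _ i hsort h
  obtain ⟨m, hm, rfl, _⟩ := mem_plantList arr i |>.mp hbounds.2.2
  refine ⟨?_, hbounds.1, by omega, hbounds.2.1, by exact_mod_cast hm⟩
  rw [consume_eq, takeWhile_eq_filter_of_sorted _ _ (plantsGT_pairwise arr last),
      dropWhile_eq_filter_of_sorted _ _ (plantsGT_pairwise arr last), filter_plantsGT, h]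
  simp only [Option.getD_some]
  congr 1
  unfold plantsGT
  rw [List.filter_filter]
  apply List.filter_congr
  intro p hp
  have hiff : (f < p ∧ last < p) ↔ ((m : Int) < p) := by
    constructor
    · intro h'; omega
    · intro hip
      refine ⟨?_, by omega⟩
      by_contra hpf
      have hpin : p ∈ (plantList arr).filter (fun p => decide (last < p) && decide (p ≤ f)) := by
        simp [List.mem_filter, hp]; omega
      have := hmax p hpin
      omega
  rw [← Bool.decide_and, decide_eq_decide]
  exact hiff

theorem loop_eq (k : Int) (arr : List Int) : ∀ (fuel : Nat) (start last total : Int),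
    -1 ≤ last →
    pylonsLoop k arr (arr.length : Int) fuel start last total =
      altLoop k (arr.length : Int) fuel (plantsGT arr last) start last total := by
  intro fuel
  induction fuel with
  | zero => intro start last total _; rfl
  | succ m ih =>
    intro start last total hl
    simp only [pylonsLoop, altLoop]
    by_cases hstart : start < (arr.length : Int)
    · simp only [if_pos hstart]
      split
      · rename_i i hscan
        obtain ⟨hcons, hli, h0i, hif, hilen⟩ := consume_some arr _ last i hl hscan
        rw [hcons]
        rw [if_neg (by omega)]
        exact ih (i + k) i (total + 1) (by omega)
      · rename_i hscan
        have h1 := consume_none arr _ last hl hscan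
        simp [h1]
    · simp [hstart]

-- ===== VERDICT (by name: the statement is the Claim_ definition above) =====
theorem pylons_spec : Claim_equal_pylons := by
  intro k arr _
  unfold Spec_pylons pylons pylons_alt
  have h0 : plantsGT arr (-1) = plantList arr := by
    unfold plantsGT
    rw [List.filter_eq_self]
    intro y hy
    obtain ⟨m, hm, rfl, _⟩ := (mem_plantList arr y).mp hy
    simp; omega
  rw [PySem.List.len_eq, ← h0]
  exact loop_eq k arr (arr.length + 1) 0 (-1) 0 (by norm_num)
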